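-- pv_equiv track=rewrite | github.com/hachi8753/mleague_app | scan/mleague.py | fiveNumber
-- ===== SOURCE A (Python) =====
-- start_id = {'18': 0, '19': 164, '20': 380, '21': 596, '22': 812, '23': 1046}
--
-- end_id = {'18': 164, '19': 380, '20': 596, '21': 812, '22': 1046, '23': 1308}
--
-- def fiveNumber(gameid: int):
--
--     gameid = int(gameid)
--
--     year, number = '00', '000'  # 初期化
--     for key, value in end_id.items():
--         if gameid <= value:
--             year = key
--             number = str(gameid - start_id[year]).zfill(3)
--             break
--     return year + number
-- ===== SOURCE B (Python) =====
-- _thresholds = [164, 380, 596, 812, 1046, 1308]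
-- _years = ['18', '19', '20', '21', '22', '23']
-- _starts = [0, 164, 380, 596, 812, 1046]
--
-- def fiveNumber(gameid: int):
--     gameid = int(gameid)
--     # binary search for the first threshold >= gameid (bisect_left by hand)
--     lo, hi = 0, len(_thresholds)
--     while lo < hi:
--         mid = (lo + hi) // 2
--         if _thresholds[mid] < gameid:
--             lo = mid + 1
--         else:
--             hi = mid
--     if lo == len(_thresholds):
--         return '00000'
--     return _years[lo] + str(gameid - _starts[lo]).zfill(3)
-- ===== Notes on version B (the rewrite author's own statement) =====
-- stated objective: alternative
-- what changed: Replaces the sequential scan over the end_id dict (with a start_id dict lookup inside) by a hand-written binary search over a sorted threshold table with parallel year/start tables.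
import Mathlib
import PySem

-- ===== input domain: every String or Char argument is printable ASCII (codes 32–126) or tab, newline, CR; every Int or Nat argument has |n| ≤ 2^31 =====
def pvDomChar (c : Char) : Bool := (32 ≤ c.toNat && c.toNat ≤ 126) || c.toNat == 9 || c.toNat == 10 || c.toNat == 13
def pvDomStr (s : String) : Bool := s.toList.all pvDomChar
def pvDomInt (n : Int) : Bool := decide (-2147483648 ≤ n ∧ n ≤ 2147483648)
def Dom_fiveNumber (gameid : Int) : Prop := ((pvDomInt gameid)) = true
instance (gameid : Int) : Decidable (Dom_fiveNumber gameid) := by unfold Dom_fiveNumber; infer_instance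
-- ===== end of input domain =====

-- B replaces A's sequential dict scan by a hand-written binary search over a sorted threshold table (alternative decomposition, same result).

-- ===== PORT A =====
-- module constants start_id / end_id
def startId : PySem.Dict String Int :=
  PySem.Dict.ofList [("18", 0), ("19", 164), ("20", 380), ("21", 596), ("22", 812), ("23", 1046)]

def endIdItems : List (String × Int) :=
  [("18", 164), ("19", 380), ("20", 596), ("21", 812), ("22", 1046), ("23", 1308)]

-- the for-loop with break: returns (year, number) state after the loop
def fiveNumberLoop (gameid : Int) : List (String × Int) → String × String
  | [] => ("00", "000")
  | (key, value) :: rest =>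
    if gameid ≤ value then
      -- start_id[year]: key is always present, so getD with any default is exact here
      (key, PySem.Str.zfill (PySem.Int.toStr (gameid - PySem.Dict.getD startId key 0)) 3)
    else fiveNumberLoop gameid rest

def fiveNumber (gameid : Int) : String :=
  let yn := fiveNumberLoop gameid endIdItems
  yn.1 ++ yn.2

-- ===== PORT B =====
def bThresholds : List Int := [164, 380, 596, 812, 1046, 1308]
def bYears : List String := ["18", "19", "20", "21", "22", "23"]
def bStarts : List Int := [0, 164, 380, 596, 812, 1046]

-- the while-loop of the hand-written bisect_left (indices stay in range, so getD is exact)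
def bsLoop (gameid : Int) (lo hi : Nat) : Nat :=
  if _h : lo < hi then
    let mid := (lo + hi) / 2
    if bThresholds.getD mid 0 < gameid then bsLoop gameid (mid + 1) hi
    else bsLoop gameid lo mid
  else lo
termination_by hi - lo
decreasing_by all_goals omega

def fiveNumber_alt (gameid : Int) : String :=
  let lo := bsLoop gameid 0 bThresholds.length
  if lo = bThresholds.length then "00000"
  else bYears.getD lo "" ++ PySem.Str.zfill (PySem.Int.toStr (gameid - bStarts.getD lo 0)) 3

-- ===== PRECONDITION & SPEC =====
def Spec_fiveNumber (gameid : Int) (out : String) : Prop := out = fiveNumber_alt gameid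
instance (gameid : Int) (out : String) : Decidable (Spec_fiveNumber gameid out) := by unfold Spec_fiveNumber; infer_instance

-- ===== CLAIM (what is proved, stated in full; the proofs are below) =====
def Claim_equal_fiveNumber : Prop := ∀ (gameid : Int), Dom_fiveNumber gameid → Spec_fiveNumber gameid (fiveNumber gameid)

-- ===== LEMMAS AND PROOFS =====

-- the binary search on the concrete 6-entry table, fully evaluated by cases on gameid
lemma bsLoop_eval (g : Int) : bsLoop g 0 6 =
    (if g ≤ 164 then 0 else if g ≤ 380 then 1 else if g ≤ 596 then 2
     else if g ≤ 812 then 3 else if g ≤ 1046 then 4 else if g ≤ 1308 then 5 else 6) := by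
  by_cases h1 : g ≤ 164
  · have a : ¬((812:Int) < g) := by omega
    have b : ¬((380:Int) < g) := by omega
    have c : ¬((164:Int) < g) := by omega
    simp [bsLoop, bThresholds, a, b, c, h1]
  · by_cases h2 : g ≤ 380
    · have a : ¬((812:Int) < g) := by omega
      have b : ¬((380:Int) < g) := by omega
      have c : (164:Int) < g := by omega
      simp [bsLoop, bThresholds, a, b, c, h1, h2]
    · by_cases h3 : g ≤ 596
      · have a : ¬((812:Int) < g) := by omega
        have b : (380:Int) < g := by omega
        have c : ¬((596:Int) < g) := by omega
        simp [bsLoop, bThresholds, a, b, c, h1, h2, h3]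
      · by_cases h4 : g ≤ 812
        · have a : ¬((812:Int) < g) := by omega
          have b : (380:Int) < g := by omega
          have c : (596:Int) < g := by omega
          simp [bsLoop, bThresholds, a, b, c, h1, h2, h3, h4]
        · by_cases h5 : g ≤ 1046
          · have a : (812:Int) < g := by omega
            have b : ¬((1308:Int) < g) := by omega
            have c : ¬((1046:Int) < g) := by omega
            simp [bsLoop, bThresholds, a, b, c, h1, h2, h3, h4, h5]
          · by_cases h6 : g ≤ 1308
            · have a : (812:Int) < g := by omega
              have b : ¬((1308:Int) < g) := by omega
              have c : (1046:Int) < g := by omega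
              simp [bsLoop, bThresholds, a, b, c, h1, h2, h3, h4, h5, h6]
            · have a : (812:Int) < g := by omega
              have b : (1308:Int) < g := by omega
              simp [bsLoop, bThresholds, a, b, h1, h2, h3, h4, h5, h6]

lemma fiveNumber_eq (g : Int) : fiveNumber g = fiveNumber_alt g := by
  have k18 : PySem.Dict.getD startId "18" 0 = 0 := by decide
  have k19 : PySem.Dict.getD startId "19" 0 = 164 := by decide
  have k20 : PySem.Dict.getD startId "20" 0 = 380 := by decide
  have k21 : PySem.Dict.getD startId "21" 0 = 596 := by decide
  have k22 : PySem.Dict.getD startId "22" 0 = 812 := by decide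
  have k23 : PySem.Dict.getD startId "23" 0 = 1046 := by decide
  unfold fiveNumber fiveNumber_alt
  have hlen : bThresholds.length = 6 := by decide
  rw [hlen, bsLoop_eval]
  simp only [fiveNumberLoop, endIdItems]
  split_ifs <;>
    simp_all [bYears, bStarts, k18, k19, k20, k21, k22, k23]

-- ===== VERDICT (by name: the statement is the Claim_ definition above) =====
theorem fiveNumber_spec : Claim_equal_fiveNumber := by
  intro g _
  unfold Spec_fiveNumber
  exact fiveNumber_eq g
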